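-- pv_equiv track=rewrite | github.com/rustyworks/topcoder-plugins | Backup/testprograms/ReportAccess.py | whoCanSee
-- ===== SOURCE A (Python) =====
-- def whoCanSee(username, allowed_data, report_data):
--     allowed_users = []
--
--     for user, access_level in zip(username, allowed_data):
--         for allowed_access_level in report_data:
--             if allowed_access_level not in access_level.split():
--                 break
--         else:
--             allowed_users.append(user)
--     return sorted(allowed_users)
-- ===== SOURCE B (Python) =====
-- def whoCanSee(username, allowed_data, report_data):
--     # Inverted index: token -> set of entry indices whose access level contains it.
--     index = {}
--     for i, (_, access_level) in enumerate(zip(username, allowed_data)):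
--         for token in access_level.split():
--             index[token] = index.get(token, set()) | {i}
--     qualifying = set(range(min(len(username), len(allowed_data))))
--     for level in report_data:
--         qualifying = qualifying & index.get(level, set())
--     return sorted(username[i] for i in sorted(qualifying))
-- ===== Notes on version B (the rewrite author's own statement) =====
-- stated objective: alternative
-- what changed: Replaces the per-user rescan of each access string with an inverted index (token -> set of entry indices) built once, then intersects the index sets over the required report levels and reads the qualifying usernames off the sorted index set.
import Mathlib
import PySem

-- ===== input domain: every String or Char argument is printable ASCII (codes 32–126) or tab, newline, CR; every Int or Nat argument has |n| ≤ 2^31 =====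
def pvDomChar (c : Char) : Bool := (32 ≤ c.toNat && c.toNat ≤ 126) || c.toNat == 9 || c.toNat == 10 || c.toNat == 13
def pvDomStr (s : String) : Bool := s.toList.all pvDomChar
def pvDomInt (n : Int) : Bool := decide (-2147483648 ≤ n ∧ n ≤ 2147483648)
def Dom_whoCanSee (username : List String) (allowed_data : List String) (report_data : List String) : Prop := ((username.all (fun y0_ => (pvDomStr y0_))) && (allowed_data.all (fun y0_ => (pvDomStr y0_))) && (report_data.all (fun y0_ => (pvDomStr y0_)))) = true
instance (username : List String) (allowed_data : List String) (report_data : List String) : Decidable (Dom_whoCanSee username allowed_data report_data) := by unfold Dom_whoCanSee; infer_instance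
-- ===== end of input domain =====

-- B replaces A's per-user rescan by an inverted index from access tokens to entry-index sets,
-- intersected over the required report levels (objective: alternative).

-- ===== PORT A =====
-- A's inner 'for … else' loop: breaks (false) at the first report level missing from the split access level.
def pvCheckA (access_level : String) (report_data : List String) : Bool :=
  match report_data with
  | [] => true
  | l :: rest =>
    if !((PySem.Str.split₀ access_level).contains l) then false
    else pvCheckA access_level rest

def whoCanSee (username : List String) (allowed_data : List String) (report_data : List String) : List String :=
  let allowed_users := (username.zip allowed_data).foldl
    (fun acc p => if pvCheckA p.2 report_data then acc ++ [p.1] else acc) []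
  PySem.List.sorted allowed_users (fun x => x) false

-- ===== PORT B =====
def whoCanSee_alt (username : List String) (allowed_data : List String) (report_data : List String) : List String :=
  let index : PySem.Dict String (PySem.Set Int) :=
    (PySem.List.enumerate (username.zip allowed_data) 0).foldl
      (fun d p => (PySem.Str.split₀ p.2.2).foldl
        (fun d tok => d.modify tok PySem.Set.empty (fun s => PySem.Set.union s [p.1])) d)
      PySem.Dict.empty
  let qual0 : PySem.Set Int :=
    PySem.Set.ofList (PySem.List.pyRange 0 ((min username.length allowed_data.length : Nat) : Int) 1)
  let qual : PySem.Set Int :=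
    report_data.foldl (fun q lvl => PySem.Set.inter q (index.getD lvl PySem.Set.empty)) qual0
  -- username[i]: every i in qual is a valid zip index, so the pyGetD default "" is never used
  PySem.List.sorted
    ((PySem.List.sorted qual (fun x => x) false).map (fun i => PySem.List.pyGetD username i ""))
    (fun x => x) false

-- ===== PRECONDITION & SPEC =====
def Spec_whoCanSee (username : List String) (allowed_data : List String) (report_data : List String) (out : List String) : Prop := out = whoCanSee_alt username allowed_data report_data
instance (username : List String) (allowed_data : List String) (report_data : List String) (out : List String) : Decidable (Spec_whoCanSee username allowed_data report_data out) := by unfold Spec_whoCanSee; infer_instance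

-- ===== CLAIM (what is proved, stated in full; the proofs are below) =====
def Claim_equal_whoCanSee : Prop := ∀ (username : List String) (allowed_data : List String) (report_data : List String), Dom_whoCanSee username allowed_data report_data → Spec_whoCanSee username allowed_data report_data (whoCanSee username allowed_data report_data)

-- ===== LEMMAS AND PROOFS =====

theorem pvCheckA_eq_all (a : String) (rd : List String) :
    pvCheckA a rd = rd.all (fun l => (PySem.Str.split₀ a).contains l) := by
  induction rd with
  | nil => rfl
  | cons l rest ih =>
    simp only [pvCheckA, List.all_cons, ih]
    cases (PySem.Str.split₀ a).contains l <;> simp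

-- inner token loop: membership in the set stored at tok
theorem pv_inner_mem (toks : List String) (d : PySem.Dict String (PySem.Set Int))
    (i : Int) (tok : String) (j : Int) :
    j ∈ (toks.foldl (fun d t => d.modify t PySem.Set.empty (fun s => PySem.Set.union s [i])) d).getD tok PySem.Set.empty
      ↔ j ∈ d.getD tok PySem.Set.empty ∨ (tok ∈ toks ∧ j = i) := by
  induction toks generalizing d with
  | nil => simp
  | cons t rest ih =>
    simp only [List.foldl_cons, ih, PySem.Dict.getD_modify]
    by_cases h : tok = t
    · subst h
      simp [PySem.Set.mem_union, List.mem_cons]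
      tauto
    · simp [h, List.mem_cons]

-- outer entry loop: membership in the set stored at tok in the full inverted index
theorem pv_outer_mem (zs : List (String × String)) (s : Int)
    (d : PySem.Dict String (PySem.Set Int)) (tok : String) (j : Int) :
    j ∈ ((PySem.List.enumerate zs s).foldl
          (fun d p => (PySem.Str.split₀ p.2.2).foldl
            (fun d t => d.modify t PySem.Set.empty (fun s' => PySem.Set.union s' [p.1])) d) d).getD tok PySem.Set.empty
      ↔ j ∈ d.getD tok PySem.Set.empty ∨
        ∃ k : Nat, k < zs.length ∧ j = s + k ∧ tok ∈ PySem.Str.split₀ (zs.getD k ("", "")).2 := by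
  induction zs generalizing s d with
  | nil => simp [PySem.List.enumerate_nil]
  | cons z rest ih =>
    rw [PySem.List.enumerate_cons, List.foldl_cons, ih, pv_inner_mem]
    constructor
    · rintro ((h | ⟨ht, hj⟩) | ⟨k, hk, hj, hm⟩)
      · exact Or.inl h
      · exact Or.inr ⟨0, by simp, by simpa using hj, by simpa using ht⟩
      · exact Or.inr ⟨k + 1, by simpa using hk, by push_cast at hj ⊢; omega, by simpa using hm⟩
    · rintro (h | ⟨k, hk, hj, hm⟩)
      · exact Or.inl (Or.inl h)
      · cases k with
        | zero => exact Or.inl (Or.inr ⟨by simpa using hm, by simpa using hj⟩)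
        | succ k =>
          exact Or.inr ⟨k, by simpa using hk, by push_cast at hj ⊢; omega, by simpa using hm⟩

-- intersection loop = filter by membership in every report level's set
theorem pv_inter_fold (rd : List String) (g : String → PySem.Set Int) (q : PySem.Set Int) :
    rd.foldl (fun q lvl => PySem.Set.inter q (g lvl)) q
      = q.filter (fun j => rd.all (fun lvl => (g lvl).contains j)) := by
  induction rd generalizing q with
  | nil => simp
  | cons l rest ih =>
    rw [List.foldl_cons, ih, PySem.Set.inter, List.filter_filter]
    apply List.filter_congr
    intro j _
    simp [Bool.and_comm]

theorem pv_pyRange_cast (n : Nat) :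
    PySem.List.pyRange 0 (n : Int) 1 = (List.range n).map (fun k : Nat => (k : Int)) := by
  rw [PySem.List.pyRange_one]
  simp

-- index filter/map over range = filter/map over the list itself
theorem pv_range_filter_map {α β : Type} (zs : List α) (Q : α → Bool) (f : α → β) (dflt : α) :
    ((List.range zs.length).filter (fun k => Q (zs.getD k dflt))).map (fun k => f (zs.getD k dflt))
      = (zs.filter Q).map f := by
  induction zs with
  | nil => simp
  | cons x t ih =>
    have hc1 : ((fun k => Q ((x :: t).getD k dflt)) ∘ Nat.succ) = (fun k => Q (t.getD k dflt)) := by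
      funext k; simp
    have hc2 : ((fun k => f ((x :: t).getD k dflt)) ∘ Nat.succ) = (fun k => f (t.getD k dflt)) := by
      funext k; simp
    rw [List.length_cons, List.range_succ_eq_map, List.filter_cons, List.filter_map, hc1]
    by_cases hx : Q x
    · rw [if_pos (by simpa using hx), List.map_cons, List.map_map, hc2, ih]
      simp [hx]
    · rw [if_neg (by simpa using hx), List.map_map, hc2, ih]
      simp [hx]

-- ===== VERDICT (by name: the statement is the Claim_ definition above) =====
theorem whoCanSee_spec : Claim_equal_whoCanSee := by
  intro username allowed_data report_data _
  unfold Spec_whoCanSee whoCanSee whoCanSee_alt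
  set zs := username.zip allowed_data with hzs
  -- A's pre-sort list is the filtered zip
  rw [PySem.List.foldl_append_if (p := fun p => pvCheckA p.2 report_data) (f := Prod.fst)]
  simp only [List.nil_append]
  -- B: rewrite the intersection fold
  rw [pv_inter_fold]
  have hlen : ((min username.length allowed_data.length : Nat) : Int) = (zs.length : Int) := by
    simp [hzs]
  rw [hlen]
  have hnodup : (PySem.List.pyRange 0 (zs.length : Int) 1).Nodup := PySem.List.nodup_pyRange_one _ _
  rw [PySem.Set.ofList_eq_self_of_nodup _ hnodup]
  set P : Int → Bool := fun j => report_data.all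
    (fun lvl => (((PySem.List.enumerate zs 0).foldl
      (fun d p => (PySem.Str.split₀ p.2.2).foldl
        (fun d t => d.modify t PySem.Set.empty (fun s' => PySem.Set.union s' [p.1])) d)
      PySem.Dict.empty).getD lvl PySem.Set.empty).contains j) with hP
  -- the filtered range is still strictly increasing, so the inner sort is the identity
  have hsorted : PySem.List.sorted ((PySem.List.pyRange 0 (zs.length : Int) 1).filter P)
      (fun x => x) false = (PySem.List.pyRange 0 (zs.length : Int) 1).filter P := by
    apply PySem.List.sorted_eq_self_of_pairwise
    exact ((PySem.List.pairwise_lt_pyRange_one 0 (zs.length : Int)).filter P).imp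
      (fun h => le_of_lt h)
  rw [hsorted]
  -- reduce the range to List.range and identify the predicates pointwise
  rw [pv_pyRange_cast, List.filter_map, List.map_map]
  have hpred : ∀ k ∈ List.range zs.length,
      (P ∘ fun k : Nat => (k : Int)) k
        = (fun p : String × String => pvCheckA p.2 report_data) (zs.getD k ("", "")) := by
    intro k hk
    rw [List.mem_range] at hk
    have hpt : ∀ lvl : String,
        ((((PySem.List.enumerate zs 0).foldl
            (fun d p => (PySem.Str.split₀ p.2.2).foldl
              (fun d t => d.modify t PySem.Set.empty (fun s' => PySem.Set.union s' [p.1])) d)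
            PySem.Dict.empty).getD lvl PySem.Set.empty).contains (k : Int)) = true
          ↔ lvl ∈ PySem.Str.split₀ (zs.getD k ("", "")).2 := by
      intro lvl
      rw [PySem.Set.contains_iff, pv_outer_mem]
      simp only [PySem.Dict.getD_empty]
      constructor
      · rintro (h | ⟨k', hk', hj, hm⟩)
        · simp [PySem.Set.empty] at h
        · have hkk : k = k' := by omega
          subst hkk
          exact hm
      · intro hm
        exact Or.inr ⟨k, hk, by omega, hm⟩
    simp only [Function.comp, hP, pvCheckA_eq_all]
    rw [Bool.eq_iff_iff, List.all_eq_true, List.all_eq_true]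
    constructor
    · intro h lvl hl
      have := (hpt lvl).mp (h lvl hl)
      simpa [List.contains_iff_mem] using this
    · intro h lvl hl
      exact (hpt lvl).mpr (by simpa [List.contains_iff_mem] using h lvl hl)
  rw [List.filter_congr hpred]
  have hmap : ∀ k ∈ (List.range zs.length).filter
      (fun k => (fun p : String × String => pvCheckA p.2 report_data) (zs.getD k ("", ""))),
      ((fun i : Int => PySem.List.pyGetD username i "") ∘ fun k : Nat => (k : Int)) k
        = (fun p : String × String => p.1) (zs.getD k ("", "")) := by
    intro k hk
    have hk' : k < zs.length := List.mem_range.mp (List.mem_of_mem_filter hk)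
    have hku : k < username.length := by
      have : zs.length ≤ username.length := by
        rw [hzs, List.length_zip]
        exact min_le_left _ _
      omega
    simp only [Function.comp, PySem.List.pyGetD_natCast]
    rw [List.getD_eq_getElem _ _ hku, List.getD_eq_getElem _ _ hk']
    simp [hzs]
  rw [List.map_congr_left hmap]
  congr 1
  exact (pv_range_filter_map zs (fun p => pvCheckA p.2 report_data) (fun p => p.1) ("", "")).symm
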